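-- pv_equiv track=rewrite | github.com/maku77/contest | codejam/2014_Round1C/B-ReorderingTrainCars.py | permutatable_count
-- ===== SOURCE A (Python) =====
-- import math
--
-- MOD = 1000000007
--
-- def permutatable_count(cars):
--     used = {}
--     for t in cars:
--         if t[0] == t[-1]:
--             used[t[0]] = used.get(t[0], 0) + 1
--     count = 1
--     for val in used.values():
--         count *= math.factorial(val)
--     return count % MOD
-- ===== SOURCE B (Python) =====
-- MOD = 1000000007
--
-- def permutatable_count(cars):
--     # Single pass: running count per first-char of matching cars; multiply the
--     # post-increment count into the product modulo MOD as we go, which equals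
--     # the product of the factorials of the group sizes mod MOD.
--     cnt = {}
--     result = 1
--     for t in cars:
--         if t[0] == t[-1]:
--             k = cnt.get(t[0], 0) + 1
--             cnt[t[0]] = k
--             result = result * k % MOD
--     return result
-- ===== Notes on version B (the rewrite author's own statement) =====
-- stated objective: faster
-- what changed: Single pass that multiplies the running per-character count into the product modulo 1000000007 at each step, instead of grouping into a dict first and then multiplying math.factorial of each group size in a second loop on unbounded big integers.
import Mathlib
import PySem

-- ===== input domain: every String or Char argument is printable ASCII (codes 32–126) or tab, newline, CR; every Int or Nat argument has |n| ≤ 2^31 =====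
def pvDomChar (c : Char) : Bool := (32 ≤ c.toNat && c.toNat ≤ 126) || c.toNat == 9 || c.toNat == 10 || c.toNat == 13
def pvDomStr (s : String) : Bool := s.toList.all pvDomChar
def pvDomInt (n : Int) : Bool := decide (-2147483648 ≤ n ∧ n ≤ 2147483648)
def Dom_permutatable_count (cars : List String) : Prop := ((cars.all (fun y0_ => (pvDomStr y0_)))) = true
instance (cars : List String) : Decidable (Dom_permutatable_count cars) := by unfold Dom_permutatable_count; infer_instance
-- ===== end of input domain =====

-- B replaces A's group-then-multiply-factorials scheme by a single pass that multiplies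
-- the running per-character count into the product, reducing mod 10^9+7 at each step
-- (objective: faster — the numbers stay below the modulus instead of growing into huge factorials).


-- ===== PORT A =====
-- math.factorial applied to the nonnegative counts A stores
def pvFact (n : Int) : Int := (n.toNat.factorial : Int)

def pvStepA (used : PySem.Dict Char Int) (t : String) : PySem.Dict Char Int :=
  match PySem.Str.pyGet? t 0, PySem.Str.pyGet? t (-1) with
  | some a, some b => if a = b then used.insert a (used.getD a 0 + 1) else used
  | _, _ => used

def permutatable_count (cars : List String) : Int :=
  let used := cars.foldl pvStepA PySem.Dict.empty
  PySem.Int.mod (used.values.foldl (fun c v => c * pvFact v) 1) 1000000007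

-- ===== PORT B =====
def pvStepB (s : PySem.Dict Char Int × Int) (t : String) : PySem.Dict Char Int × Int :=
  match PySem.Str.pyGet? t 0, PySem.Str.pyGet? t (-1) with
  | some a, some b =>
      if a = b then
        let k := s.1.getD a 0 + 1
        (s.1.insert a k, PySem.Int.mod (s.2 * k) 1000000007)
      else s
  | _, _ => s

def permutatable_count_alt (cars : List String) : Int :=
  (cars.foldl pvStepB (PySem.Dict.empty, 1)).2

-- ===== PRECONDITION & SPEC =====
-- Pre_ excludes lists containing an empty string: there both A and B raise IndexError on t[0].
def Pre_permutatable_count (cars : List String) : Prop := ∀ t ∈ cars, t ≠ ""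
instance (cars : List String) : Decidable (Pre_permutatable_count cars) := by unfold Pre_permutatable_count; infer_instance

def pvWitness_permutatable_count : List String := ["ab", "aba", "cc", "cac"]

def Spec_permutatable_count (cars : List String) (out : Int) : Prop := out = permutatable_count_alt cars
instance (cars : List String) (out : Int) : Decidable (Spec_permutatable_count cars out) := by unfold Spec_permutatable_count; infer_instance

-- ===== CLAIM (what is proved, stated in full; the proofs are below) =====
def Claim_equal_permutatable_count : Prop := ∀ (cars : List String), Dom_permutatable_count cars → Pre_permutatable_count cars → Spec_permutatable_count cars (permutatable_count cars)

-- ===== LEMMAS AND PROOFS =====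

lemma pvFact_succ (v : Int) (hv : 0 ≤ v) : pvFact (v + 1) = pvFact v * (v + 1) := by
  unfold pvFact
  have h : (v + 1).toNat = v.toNat + 1 := by omega
  rw [h, Nat.factorial_succ]
  push_cast
  have : ((v.toNat : Int)) = v := by omega
  rw [this]; ring

lemma pvFoldlMul (l : List Int) (i : Int) :
    l.foldl (fun c v => c * pvFact v) i = i * (l.map pvFact).prod := by
  induction l generalizing i with
  | nil => simp
  | cons x xs ih => simp [List.foldl_cons, ih, mul_assoc]

-- inserting the incremented count multiplies the product of factorials of the values by the new count
lemma pvInsertProd (d : PySem.Dict Char Int) (a : Char)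
    (hnd : d.keys.Nodup) (hnn : ∀ p ∈ d.items, 0 ≤ p.2) :
    ((d.insert a (d.getD a 0 + 1)).values.map pvFact).prod
      = (d.values.map pvFact).prod * (d.getD a 0 + 1) := by
  by_cases hc : d.contains a = true
  · -- key present: the entry with key a is overwritten in place
    have hg : d.get? a = some (d.getD a 0) := by
      rcases Option.isSome_iff_exists.mp (by rw [← PySem.Dict.contains_eq_isSome_get? d a]; exact hc) with ⟨v, hv⟩
      rw [hv, PySem.Dict.getD_of_get?_eq_some d 0 hv]
    have hmem : (a, d.getD a 0) ∈ d.items := PySem.Dict.mem_items_of_get?_eq_some d hg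
    rcases List.append_of_mem hmem with ⟨l1, l2, hsplit⟩
    have hkeys : d.keys = l1.map Prod.fst ++ a :: l2.map Prod.fst := by
      simp [PySem.Dict.keys, hsplit]
    have hnotl1 : a ∉ l1.map Prod.fst := by
      rw [hkeys] at hnd
      intro h; exact (List.disjoint_of_nodup_append hnd) h (by simp)
    have hnotl2 : a ∉ l2.map Prod.fst := by
      rw [hkeys] at hnd
      have h2 := (List.nodup_append.mp hnd).2.1
      simp only [List.nodup_cons] at h2
      exact h2.1
    have hitems : (d.insert a (d.getD a 0 + 1)).items
        = l1 ++ (a, d.getD a 0 + 1) :: l2 := by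
      rw [PySem.Dict.items_insert_of_contains d _ hc, hsplit]
      simp only [List.map_append, List.map_cons, beq_self_eq_true, if_pos]
      congr 1
      · rw [List.map_congr_left (g := fun p => p)
          (fun p hp => by
            have hpa : p.1 ≠ a := fun h => hnotl1 (h ▸ List.mem_map_of_mem (f := Prod.fst) hp)
            simp [hpa]), List.map_id']
      · congr 1
        rw [List.map_congr_left (g := fun p => p)
          (fun p hp => by
            have hpa : p.1 ≠ a := fun h => hnotl2 (h ▸ List.mem_map_of_mem (f := Prod.fst) hp)
            simp [hpa]), List.map_id']
    have h0 : 0 ≤ d.getD a 0 := hnn _ hmem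
    have hvals : d.values = l1.map Prod.snd ++ d.getD a 0 :: l2.map Prod.snd := by
      simp [PySem.Dict.values, hsplit]
    have hvals' : (d.insert a (d.getD a 0 + 1)).values
        = l1.map Prod.snd ++ (d.getD a 0 + 1) :: l2.map Prod.snd := by
      simp [PySem.Dict.values, hitems]
    rw [hvals, hvals']
    simp only [List.map_append, List.map_cons, List.prod_append, List.prod_cons]
    rw [pvFact_succ _ h0]; ring
  · -- key absent: getD is the default 0 and the new entry (a, 1) is appended
    have hc' : d.contains a = false := by simpa using hc
    have hg : d.getD a 0 = 0 := PySem.Dict.getD_of_not_contains d 0 hc'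
    have hitems : (d.insert a (d.getD a 0 + 1)).items = d.items ++ [(a, d.getD a 0 + 1)] :=
      PySem.Dict.items_insert_of_not_contains d _ hc'
    have hvals : (d.insert a (d.getD a 0 + 1)).values = d.values ++ [d.getD a 0 + 1] := by
      simp [PySem.Dict.values, hitems]
    rw [hvals, hg]
    simp [pvFact, PySem.Dict.values]

-- loop invariant: B's running product tracks the product of factorials of A's dict values
lemma pvLoopInv (cars : List String) (d : PySem.Dict Char Int) (r : Int)
    (hnd : d.keys.Nodup) (hnn : ∀ p ∈ d.items, 0 ≤ p.2)
    (hr : r = (d.values.map pvFact).prod % 1000000007) :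
    (cars.foldl pvStepB (d, r)).2 = ((cars.foldl pvStepA d).values.map pvFact).prod % 1000000007 := by
  induction cars generalizing d r with
  | nil => simpa using hr
  | cons t ts ih =>
    simp only [List.foldl_cons]
    rcases h0 : PySem.Str.pyGet? t 0 with _ | a <;>
      rcases h1 : PySem.Str.pyGet? t (-1) with _ | b
    all_goals simp only [pvStepA, pvStepB, h0, h1]
    case some.some =>
      by_cases hab : a = b
      · simp only [hab]
        subst hab
        apply ih
        · exact PySem.Dict.nodup_keys_insert _ _ _ hnd
        · intro p hp
          rcases (PySem.Dict.mem_items_insert d a _ p).mp hp with h | ⟨h, _⟩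
          · subst h
            have : 0 ≤ d.getD a 0 := by
              by_cases hc : d.contains a = true
              · have hg : d.get? a = some (d.getD a 0) := by
                  rcases Option.isSome_iff_exists.mp
                    (by rw [← PySem.Dict.contains_eq_isSome_get? d a]; exact hc) with ⟨v, hv⟩
                  rw [hv, PySem.Dict.getD_of_get?_eq_some d 0 hv]
                exact hnn _ (PySem.Dict.mem_items_of_get?_eq_some d hg)
              · rw [PySem.Dict.getD_of_not_contains d 0 (by simpa using hc)]
            simp; omega
          · exact hnn _ h
        · rw [PySem.Int.mod_eq_emod_of_pos (by norm_num), hr, pvInsertProd d a hnd hnn,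
            Int.mul_emod, Int.mul_emod ((d.values.map pvFact).prod), Int.emod_emod_of_dvd _ dvd_rfl]
      · simp only [if_neg hab]
        exact ih d r hnd hnn hr
    all_goals exact ih d r hnd hnn hr

-- ===== VERDICT (by name: the statement is the Claim_ definition above) =====
theorem permutatable_count_spec : Claim_equal_permutatable_count := by
  intro cars _ _
  unfold Spec_permutatable_count permutatable_count permutatable_count_alt
  simp only []
  rw [pvLoopInv cars PySem.Dict.empty 1 PySem.Dict.nodup_keys_empty (by simp [PySem.Dict.empty]) (by simp [PySem.Dict.empty, PySem.Dict.values])]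
  rw [pvFoldlMul, one_mul, PySem.Int.mod_eq_emod_of_pos (by norm_num)]
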